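-- pv_equiv track=rewrite | github.com/nguyentran6698/LC_Practice | dailycodingproblem/problem903.py | solution
-- ===== SOURCE A (Python) =====
-- def solution(nums,k):
--     d = set()
--     for i in range(len(nums)):
--         r = k - i
--         for j in range(i+1,len(nums)):
--             if(r - nums[j]) in d:
--                 return True
--             d.add(r - nums[j])
--     return False
-- ===== SOURCE B (Python) =====
-- def solution(nums, k):
--     # Equivalent test: some value i + nums[j] (0 <= i < j < len(nums)) repeats,
--     # i.e. two of the integer intervals [nums[j], nums[j]+j-1] (j >= 1) overlap.
--     intervals = sorted(((nums[j], nums[j] + j - 1) for j in range(1, len(nums))), key=lambda t: t[0])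
--     prev_end = None
--     for s, e in intervals:
--         if prev_end is not None and s <= prev_end:
--             return True
--         if prev_end is None or e > prev_end:
--             prev_end = e
--     return False
-- ===== Notes on version B (the rewrite author's own statement) =====
-- stated objective: alternative
-- what changed: A scans pairs (i,j) inserting k-i-nums[j] into a set until a repeat; B notes a repeat exists iff two of the intervals [nums[j], nums[j]+j-1] (j>=1) overlap, and detects overlap by sorting the intervals by start and one running-max-end sweep; B trades A's early-exit pair scan (quadratic in the worst case, but very fast when a collision comes early) for a uniform sort-and-sweep.
import Mathlib
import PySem

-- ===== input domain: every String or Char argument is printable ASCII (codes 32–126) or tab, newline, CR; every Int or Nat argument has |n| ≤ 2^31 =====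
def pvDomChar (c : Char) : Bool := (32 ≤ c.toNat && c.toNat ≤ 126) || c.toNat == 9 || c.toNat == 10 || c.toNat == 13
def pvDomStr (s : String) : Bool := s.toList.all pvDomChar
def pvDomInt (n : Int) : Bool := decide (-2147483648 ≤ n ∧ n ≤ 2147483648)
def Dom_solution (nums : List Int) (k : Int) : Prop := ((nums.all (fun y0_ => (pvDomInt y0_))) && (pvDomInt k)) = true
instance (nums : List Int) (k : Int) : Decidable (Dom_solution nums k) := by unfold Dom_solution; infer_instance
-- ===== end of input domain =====

-- B replaces A's pair-scan-with-a-set by a different algorithm: a repeated value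
-- k-i-nums[j] exists iff two intervals [nums[j], nums[j]+j-1] overlap, which B
-- detects by sorting the intervals by start and sweeping a running maximum end.


-- ===== PORT A =====
-- inner loop: 'for j in range(i+1, len(nums)): if (r - nums[j]) in d: return True; d.add(r - nums[j])'
-- returns none when the Python returns True, some d' with the updated set otherwise
def solInner (nums : List Int) (r : Int) : PySem.Set Int → List Int → Option (PySem.Set Int)
  | d, [] => some d
  | d, j :: js =>
      if PySem.Set.contains d (r - PySem.List.pyGetD nums j 0) then none
      else solInner nums r (PySem.Set.add d (r - PySem.List.pyGetD nums j 0)) js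

-- outer loop: 'for i in range(len(nums)): r = k - i; <inner>'
def solOuter (nums : List Int) (k : Int) : PySem.Set Int → List Int → Bool
  | _, [] => false
  | d, i :: is =>
      match solInner nums (k - i) d (PySem.List.pyRange (i + 1) (nums.length : Int) 1) with
      | none => true
      | some d' => solOuter nums k d' is

def solution (nums : List Int) (k : Int) : Bool :=
  solOuter nums k PySem.Set.empty (PySem.List.pyRange 0 (nums.length : Int) 1)

-- ===== PORT B =====
-- sweep over the start-sorted intervals with the running maximum end (prev_end, None initially)
def sweepB : Option Int → List (Int × Int) → Bool
  | _, [] => false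
  | none, (_, e) :: t => sweepB (some e) t
  | some m, (s, e) :: t =>
      if s ≤ m then true
      else sweepB (some (if e > m then e else m)) t

def solution_alt (nums : List Int) (k : Int) : Bool :=
  let intervals :=
    PySem.List.sorted
      ((PySem.List.pyRange 1 (nums.length : Int) 1).map
        (fun j => (PySem.List.pyGetD nums j 0, PySem.List.pyGetD nums j 0 + j - 1)))
      (fun t => t.1) false
  sweepB none intervals

-- ===== PRECONDITION & SPEC =====
def Spec_solution (nums : List Int) (k : Int) (out : Bool) : Prop := out = solution_alt nums k
instance (nums : List Int) (k : Int) (out : Bool) : Decidable (Spec_solution nums k out) := by unfold Spec_solution; infer_instance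

-- ===== CLAIM (what is proved, stated in full; the proofs are below) =====
def Claim_equal_solution : Prop := ∀ (nums : List Int) (k : Int), Dom_solution nums k → Spec_solution nums k (solution nums k)

-- ===== LEMMAS AND PROOFS =====

-- the flat list of values A inserts into its set, in iteration order
def valsOf (nums : List Int) (k : Int) : List Int :=
  (PySem.List.pyRange 0 (nums.length : Int) 1).flatMap
    (fun i => (PySem.List.pyRange (i + 1) (nums.length : Int) 1).map
      (fun j => (k - i) - PySem.List.pyGetD nums j 0))

-- interval overlap (symmetric)
def Ov (a b : Int × Int) : Prop := b.1 ≤ a.2 ∧ a.1 ≤ b.2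

-- A's inner loop: aborts (none) iff the batch has an internal duplicate or hits d;
-- otherwise returns d extended by exactly the batch values.
theorem solInner_char (nums : List Int) (r : Int) (d : PySem.Set Int) (js : List Int) :
    (solInner nums r d js = none ↔
      ¬ ((js.map (fun j => r - PySem.List.pyGetD nums j 0)).Nodup ∧
         ∀ v ∈ js.map (fun j => r - PySem.List.pyGetD nums j 0), v ∉ d)) ∧
    (∀ d', solInner nums r d js = some d' →
      ∀ v, v ∈ d' ↔ v ∈ d ∨ v ∈ js.map (fun j => r - PySem.List.pyGetD nums j 0)) := by
  induction js generalizing d with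
  | nil => simp [solInner]
  | cons j js ih =>
    set w := r - PySem.List.pyGetD nums j 0 with hw
    by_cases hmem : w ∈ d
    · have hnone : solInner nums r d (j :: js) = none := by
        simp only [solInner, ← hw, if_pos ((PySem.Set.contains_iff _ _).mpr hmem)]
      constructor
      · rw [hnone]
        simp only [List.map_cons, List.mem_cons, List.nodup_cons]
        exact iff_of_true trivial (fun hcon => absurd hmem (hcon.2 w (Or.inl hw)))
      · intro d' hd'
        rw [hnone] at hd'
        cases hd'
    · have hc : PySem.Set.contains d w ≠ true := by
        intro h; exact hmem ((PySem.Set.contains_iff _ _).mp h)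
      have heq : solInner nums r d (j :: js) = solInner nums r (PySem.Set.add d w) js := by
        simp only [solInner, ← hw, if_neg hc]
      obtain ⟨ih1, ih2⟩ := ih (PySem.Set.add d w)
      constructor
      · rw [heq, ih1]
        simp only [List.map_cons, List.nodup_cons, List.mem_cons, PySem.Set.mem_add]
        constructor
        · rintro hcon ⟨⟨hnm, hnd⟩, hall⟩
          exact hcon ⟨hnd, fun v hv hvd => by
            rcases hvd with hvd | rfl
            · exact hall v (Or.inr hv) hvd
            · exact hnm hv⟩
        · rintro hcon ⟨hnd, hall⟩
          refine hcon ⟨⟨fun hm => hall _ hm (Or.inr rfl), hnd⟩, ?_⟩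
          rintro v (rfl | hv)
          · exact hmem
          · exact fun hvd => hall v hv (Or.inl hvd)
      · intro d' hd' v
        rw [heq] at hd'
        rw [ih2 d' hd' v, PySem.Set.mem_add]
        simp only [List.map_cons, List.mem_cons]
        tauto

theorem solOuter_char (nums : List Int) (k : Int) (d : PySem.Set Int) (is : List Int) :
    solOuter nums k d is = true ↔
      ¬ ((is.flatMap (fun i => (PySem.List.pyRange (i + 1) (nums.length : Int) 1).map
            (fun j => (k - i) - PySem.List.pyGetD nums j 0))).Nodup ∧
         ∀ v ∈ is.flatMap (fun i => (PySem.List.pyRange (i + 1) (nums.length : Int) 1).map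
            (fun j => (k - i) - PySem.List.pyGetD nums j 0)), v ∉ d) := by
  induction is generalizing d with
  | nil => simp [solOuter]
  | cons i is ih =>
    obtain ⟨inn1, inn2⟩ := solInner_char nums (k - i) d (PySem.List.pyRange (i + 1) (nums.length : Int) 1)
    simp only [List.flatMap_cons, List.nodup_append, List.mem_append]
    cases hs : solInner nums (k - i) d (PySem.List.pyRange (i + 1) (nums.length : Int) 1) with
    | none =>
      have hno := inn1.mp hs
      simp only [solOuter, hs]
      constructor
      · rintro _ ⟨⟨hn1, -, -⟩, hall⟩
        exact hno ⟨hn1, fun v hv => hall v (Or.inl hv)⟩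
      · intro _; trivial
    | some d' =>
      have hyes : ¬ _ := fun h => by rw [inn1.mpr h] at hs; cases hs
      rw [not_not] at hyes
      obtain ⟨hgn, hgd⟩ := hyes
      have hmem := inn2 d' hs
      have : solOuter nums k d (i :: is) = solOuter nums k d' is := by
        simp only [solOuter, hs]
      rw [this, ih d']
      constructor
      · rintro hcon ⟨⟨-, hn2, hdisj⟩, hall⟩
        exact hcon ⟨hn2, fun v hv hvd' => by
          rcases (hmem v).mp hvd' with hvd | hvg
          · exact hall v (Or.inr hv) hvd
          · exact hdisj v hvg v hv rfl⟩
      · rintro hcon ⟨hn2, hall2⟩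
        refine hcon ⟨⟨hgn, hn2, fun x hx1 y hy2 hxy => hall2 y hy2 ((hmem y).mpr (Or.inr (hxy ▸ hx1)))⟩, ?_⟩
        rintro v (hv | hv)
        · exact hgd v hv
        · exact fun hvd => hall2 v hv ((hmem v).mpr (Or.inl hvd))

theorem solution_eq_not_nodup (nums : List Int) (k : Int) :
    solution nums k = true ↔ ¬ (valsOf nums k).Nodup := by
  unfold solution
  rw [solOuter_char]
  unfold valsOf
  have : ∀ v : Int, v ∉ PySem.Set.empty (α := Int) := by
    intro v hv
    cases hv
  simp only [this, not_false_iff, implies_true, and_true]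

def hop : List (Int × Int) → Prop
  | [] => False
  | (_, e) :: t => (∃ x ∈ t, x.1 ≤ e) ∨ hop t

theorem sweepB_some_char (m : Int) (t : List (Int × Int)) :
    sweepB (some m) t = true ↔ (∃ x ∈ t, x.1 ≤ m) ∨ hop t := by
  induction t generalizing m with
  | nil => simp [sweepB, hop]
  | cons p t ih =>
    obtain ⟨s, e⟩ := p
    by_cases h : s ≤ m
    · simp only [sweepB, if_pos h, hop]
      constructor
      · intro _; exact Or.inl ⟨(s, e), by simp, h⟩
      · intro _; trivial
    · simp only [sweepB, if_neg h, hop]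
      rw [ih]
      constructor
      · rintro (⟨x, hx, hle⟩ | hh)
        · by_cases he : e > m
          · simp only [if_pos he] at hle
            exact Or.inr (Or.inl ⟨x, hx, hle⟩)
          · simp only [if_neg he] at hle
            exact Or.inl ⟨x, by simp [hx], hle⟩
        · exact Or.inr (Or.inr hh)
      · rintro (⟨x, hx, hle⟩ | ⟨x, hx, hle⟩ | hh)
        · rcases List.mem_cons.mp hx with rfl | hx'
          · exact absurd hle h
          · exact Or.inl ⟨x, hx', by split <;> omega⟩
        · exact Or.inl ⟨x, hx, by split <;> omega⟩
        · exact Or.inr hh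

theorem sweepB_none_char (t : List (Int × Int)) :
    sweepB none t = true ↔ hop t := by
  cases t with
  | nil => simp [sweepB, hop]
  | cons p t =>
    obtain ⟨s, e⟩ := p
    simp only [sweepB, hop]
    rw [sweepB_some_char]

-- on a start-sorted list of nonempty intervals, the sweep condition is exactly pairwise overlap
theorem hop_iff_not_pairwise (l : List (Int × Int))
    (hne : ∀ x ∈ l, x.1 ≤ x.2)
    (hs : l.Pairwise (fun a b => a.1 ≤ b.1)) :
    hop l ↔ ¬ l.Pairwise (fun a b => ¬ Ov a b) := by
  induction l with
  | nil => simp [hop]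
  | cons p t ih =>
    obtain ⟨s, e⟩ := p
    rw [List.pairwise_cons] at hs
    simp only [hop, List.pairwise_cons, not_and_or]
    rw [ih (fun x hx => hne x (List.mem_cons_of_mem _ hx)) hs.2]
    constructor
    · rintro (⟨x, hx, hle⟩ | hh)
      · refine Or.inl ?_
        push_neg
        refine ⟨x, hx, hle, ?_⟩
        exact le_trans (hs.1 x hx) (hne x (List.mem_cons_of_mem _ hx))
      · exact Or.inr hh
    · rintro (hcon | hh)
      · push_neg at hcon
        obtain ⟨x, hx, h1, _⟩ := hcon
        exact Or.inl ⟨x, hx, h1⟩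
      · exact Or.inr hh

theorem pairwise_pyRange_one_iff (S : Int → Int → Prop) (a b : Int) :
    (PySem.List.pyRange a b 1).Pairwise S ↔ ∀ x y, a ≤ x → x < y → y < b → S x y := by
  rw [PySem.List.pyRange_one, List.pairwise_map, List.pairwise_iff_getElem]
  simp only [List.length_range, List.getElem_range]
  constructor
  · intro h x y hax hxy hyb
    have hx : (x - a).toNat < (b - a).toNat := by omega
    have hy : (y - a).toNat < (b - a).toNat := by omega
    have := h _ _ hx hy (by omega)
    have e1 : a + ((x - a).toNat : Int) = x := by omega
    have e2 : a + ((y - a).toNat : Int) = y := by omega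
    rwa [e1, e2] at this
  · intro h i j hi hj hij
    exact h _ _ (by omega) (by omega) (by omega)

-- the combinatorial heart: a duplicated value i + nums[j] (i < j) is the same thing
-- as two overlapping intervals [nums[j], nums[j]+j-1]
theorem dup_iff_overlap (a : Int → Int) (n : Int) :
    (∃ i1 j1 i2 j2 : Int, 0 ≤ i1 ∧ i1 < j1 ∧ j1 < n ∧ 0 ≤ i2 ∧ i2 < j2 ∧ j2 < n ∧
       (i1 ≠ i2 ∨ j1 ≠ j2) ∧ i1 + a j1 = i2 + a j2) ↔
    (∃ j1 j2 : Int, 1 ≤ j1 ∧ j1 < j2 ∧ j2 < n ∧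
       a j2 ≤ a j1 + j1 - 1 ∧ a j1 ≤ a j2 + j2 - 1) := by
  constructor
  · rintro ⟨i1, j1, i2, j2, h1, h2, h3, h4, h5, h6, hne, heq⟩
    rcases lt_trichotomy j1 j2 with hj | hj | hj
    · exact ⟨j1, j2, by omega, hj, h6, by omega, by omega⟩
    · subst hj
      omega
    · exact ⟨j2, j1, by omega, hj, h3, by omega, by omega⟩
  · rintro ⟨j1, j2, h1, h2, h3, h4, h5⟩
    refine ⟨max (a j1) (a j2) - a j1, j1, max (a j1) (a j2) - a j2, j2, ?_, ?_, by omega,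
      ?_, ?_, h3, Or.inr (by omega), by omega⟩ <;>
      rcases max_cases (a j1) (a j2) with ⟨hm, _⟩ | ⟨hm, _⟩ <;> omega

theorem not_nodup_vals_iff (nums : List Int) (k : Int) :
    ¬ (valsOf nums k).Nodup ↔
      (∃ i1 j1 i2 j2 : Int, 0 ≤ i1 ∧ i1 < j1 ∧ j1 < (nums.length : Int) ∧
        0 ≤ i2 ∧ i2 < j2 ∧ j2 < (nums.length : Int) ∧
        (i1 ≠ i2 ∨ j1 ≠ j2) ∧
        i1 + PySem.List.pyGetD nums j1 0 = i2 + PySem.List.pyGetD nums j2 0) := by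
  unfold valsOf
  rw [List.nodup_flatMap]
  constructor
  · intro h
    rw [not_and_or] at h
    rcases h with h | h
    · push_neg at h
      obtain ⟨i, hi, hnd⟩ := h
      rw [List.Nodup, List.pairwise_map, pairwise_pyRange_one_iff] at hnd
      push_neg at hnd
      obtain ⟨j1, j2, hj1, hj12, hj2, heq⟩ := hnd
      rw [PySem.List.mem_pyRange_one] at hi
      exact ⟨i, j1, i, j2, by omega, by omega, by omega, by omega, by omega, hj2,
        Or.inr (by omega), by omega⟩
    · rw [pairwise_pyRange_one_iff] at h
      push_neg at h
      obtain ⟨i1, i2, hi1, hi12, hi2, hdisj⟩ := h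
      have hex : ∃ a, a ∈ (PySem.List.pyRange (i1 + 1) (nums.length : Int) 1).map
            (fun j => (k - i1) - PySem.List.pyGetD nums j 0) ∧
          a ∈ (PySem.List.pyRange (i2 + 1) (nums.length : Int) 1).map
            (fun j => (k - i2) - PySem.List.pyGetD nums j 0) := by
        by_contra hc
        push_neg at hc
        exact hdisj fun a h1 h2 => hc a h1 h2
      obtain ⟨v, hv1, hv2⟩ := hex
      simp only [List.mem_map, PySem.List.mem_pyRange_one] at hv1 hv2
      obtain ⟨j1, ⟨hj1a, hj1b⟩, hveq1⟩ := hv1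
      obtain ⟨j2, ⟨hj2a, hj2b⟩, hveq2⟩ := hv2
      exact ⟨i1, j1, i2, j2, by omega, by omega, hj1b, by omega, by omega, hj2b,
        Or.inl (by omega), by omega⟩
  · rintro ⟨i1, j1, i2, j2, h1, h2, h3, h4, h5, h6, hne, heq⟩ ⟨hall, hpw⟩
    by_cases hii : i1 = i2
    · subst hii
      have hjj : j1 ≠ j2 := by omega
      have := hall i1 (by rw [PySem.List.mem_pyRange_one]; omega)
      rw [List.Nodup, List.pairwise_map, pairwise_pyRange_one_iff] at this
      rcases lt_or_gt_of_ne hjj with hlt | hgt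
      · exact this j1 j2 (by omega) hlt h6 (by omega)
      · exact this j2 j1 (by omega) hgt h3 (by omega)
    · rw [pairwise_pyRange_one_iff] at hpw
      rcases lt_or_gt_of_ne hii with hlt | hgt
      · have := hpw i1 i2 (by omega) hlt (by omega)
        unfold List.Disjoint at this
        exact this
          (by simp only [List.mem_map, PySem.List.mem_pyRange_one]
              exact ⟨j1, ⟨by omega, h3⟩, rfl⟩)
          (by simp only [List.mem_map, PySem.List.mem_pyRange_one]
              exact ⟨j2, ⟨by omega, h6⟩, by omega⟩)
      · have := hpw i2 i1 (by omega) hgt (by omega)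
        unfold List.Disjoint at this
        exact this
          (by simp only [List.mem_map, PySem.List.mem_pyRange_one]
              exact ⟨j2, ⟨by omega, h6⟩, rfl⟩)
          (by simp only [List.mem_map, PySem.List.mem_pyRange_one]
              exact ⟨j1, ⟨by omega, h3⟩, by omega⟩)

theorem alt_eq_overlap (nums : List Int) (k : Int) :
    solution_alt nums k = true ↔
      (∃ j1 j2 : Int, 1 ≤ j1 ∧ j1 < j2 ∧ j2 < (nums.length : Int) ∧
        PySem.List.pyGetD nums j2 0 ≤ PySem.List.pyGetD nums j1 0 + j1 - 1 ∧
        PySem.List.pyGetD nums j1 0 ≤ PySem.List.pyGetD nums j2 0 + j2 - 1) := by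
  unfold solution_alt
  set I := (PySem.List.pyRange 1 (nums.length : Int) 1).map
      (fun j => (PySem.List.pyGetD nums j 0, PySem.List.pyGetD nums j 0 + j - 1)) with hI
  set L := PySem.List.sorted I (fun t => t.1) false with hL
  have hperm : L.Perm I := PySem.List.sorted_perm I (fun t => t.1) false
  have hne : ∀ x ∈ L, x.1 ≤ x.2 := by
    intro x hx
    have : x ∈ I := hperm.mem_iff.mp hx
    rw [hI] at this
    simp only [List.mem_map, PySem.List.mem_pyRange_one] at this
    obtain ⟨j, ⟨hj1, _⟩, rfl⟩ := this
    simp only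
    omega
  have hs : L.Pairwise (fun a b => a.1 ≤ b.1) :=
    PySem.List.sorted_pairwise I (fun t => t.1)
  rw [sweepB_none_char, hop_iff_not_pairwise L hne hs,
    hperm.pairwise_iff (fun {a b} (h : ¬ Ov a b) (hba : Ov b a) => h ⟨hba.2, hba.1⟩)]
  rw [hI, List.pairwise_map, pairwise_pyRange_one_iff]
  constructor
  · intro h
    push_neg at h
    obtain ⟨j1, j2, h1, h2, h3, hov⟩ := h
    exact ⟨j1, j2, h1, h2, h3, hov.1, hov.2⟩
  · rintro ⟨j1, j2, h1, h2, h3, ho1, ho2⟩ hcon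
    exact hcon j1 j2 h1 h2 h3 ⟨ho1, ho2⟩

-- ===== VERDICT (by name: the statement is the Claim_ definition above) =====
theorem solution_spec : Claim_equal_solution := by
  intro nums k _
  unfold Spec_solution
  have hA := solution_eq_not_nodup nums k
  have h1 := not_nodup_vals_iff nums k
  have h2 := alt_eq_overlap nums k
  have h3 := dup_iff_overlap (fun j => PySem.List.pyGetD nums j 0) (nums.length : Int)
  exact Bool.eq_iff_iff.mpr (hA.trans ((h1.trans (h3.trans h2.symm))))
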